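/- GENERATED by mk_final_copies.py from the proof of the farm's unit `vorbis_decode_packet_rest.3c` (farm:vorbis_decode_packet_rest.3c.1: Lemmas.lean) as the
   re-elaboration sweep compiled it — do not edit. -/
import Asan.CheckWalk
import Vorbis.Spec.PacketRestFrame
import Vorbis.Spec.PacketRestTest
import Vorbis.Spec.ReaderLemmas
import Vorbis.Spec.Units.vorbis_decode_packet_rest_3c

/-
  THE LEMMAS OF UNIT vorbis_decode_packet_rest.3c (segment .3 from the join 0x110fc2).
  ADAPTED from the Lemmas.lean of the worker of the parent unit vorbis_decode_packet_rest.3 (attempt 1, against freeze-5): the moved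
  declarations (`seg3Wins`, `Head3Slots`, `At3Mid`, `seg3Wins_through_callee`, `seg3Wins_push`, `Head3Slots.through`, the labels
  `at_110f3b` / `at_110fc2`) are the tree's (Vorbis/Spec/PacketRest3.lean). The worker's own carry lemmas (`stable_step` … `at4_step`,
  section Pure) are kept as they were: `stable_step` is an instance of the tree's `Stable.carry` (Vorbis/Spec/PacketRestFrame.lean),
  which a new proof should use instead.
-/
open X86 X86.User Asan Vorbis Vorbis.Spec Vorbis.Spec.vorbis_decode_packet_rest

set_option maxRecDepth 4000
set_option maxHeartbeats 4000000

namespace Vorbis.Spec.vorbis_decode_packet_rest_3c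
section Pure
variable {u₀ : State} {others : List Obj} {frames : List (Nat × FrameLayout)} {len : Nat} {Ar : Arena}
  {stored room : Int} {mode : Nat} {ysz : Nat → Nat} {u : State} {ret : Word} {ls : Int} {v w : State}

/-- **A read of the own frame off the segment's stack windows is unchanged**: above `[rsp + 0x3c]`, or the slots `[rsp + 8]`,
`[rsp + 0x20 .. 0x2c)` between the windows. -/
theorem read_kept (hst : Stable u₀ others frames len Ar stored room mode ysz u ret ls v)
    (hsame : Mem.SameExcept (seg3Wins u) v.mem w.mem) (a : Word) (n : Nat)
    (h1 : (u.reg .rsp).toNat - 2940 ≤ a.toNat ∨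
      ((u.reg .rsp).toNat - 2992 ≤ a.toNat ∧ a.toNat + n ≤ (u.reg .rsp).toNat - 2984) ∨
      ((u.reg .rsp).toNat - 2968 ≤ a.toNat ∧ a.toNat + n ≤ (u.reg .rsp).toNat - 2956))
    (h2 : a.toNat + n ≤ 0x800030) :
    w.mem.readLE a n = v.mem.readLE a n := by
  have hoff := hst.inv.objOff
  simp only [voff] at hoff
  have hroom := hst.entry.room
  have htop := hst.entry.top
  simp only [Vorbis.conv_stackLo, Vorbis.conv_stackHi] at hroom htop
  apply hsame.readLE a n (by omega)
  intro s hs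
  have := seg3Wins_mem hs
  omega

/-- **Every window of the segment is a decode-time store** (`StoreOK`): the stack windows are off every allocated block, the
windows of `*f` lie in its decode-time holes. -/
theorem segWins_storeOK (hst : Stable u₀ others frames len Ar stored room mode ysz u ret ls v) (s : Span)
    (hs : s ∈ seg3Wins u) : StoreOK (RunBlk Ar len) v.mem (fOf u) s := by
  have hroom := hst.entry.room
  have htop := hst.entry.top
  simp only [Vorbis.conv_stackLo, Vorbis.conv_stackHi] at hroom htop
  have hoffs := hst.inv.offStack
  rcases seg3Wins_mem hs with h | h | h | h | h | h | h | h
  · apply StoreOK.off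
    intro B hB
    have := hoffs B hB
    omega
  · apply StoreOK.off
    intro B hB
    have := hoffs B hB
    omega
  · apply StoreOK.off
    intro B hB
    have := hoffs B hB
    omega
  all_goals
    apply StoreOK.hole
    unfold InHole
    omega

/-- **The decode-time invariant after the segment's stores**, given `Bits` of the new memory (a callee's post, or
`Bits.store_valid_bits` / `Bits.store_other` for the inline DECODE's own stores). -/
theorem seg3_inv_step (hst : Stable u₀ others frames len Ar stored room mode ysz u ret ls v)
    (hsame : Mem.SameExcept (seg3Wins u) v.mem w.mem) (hun : ShadowUntouched v.mem w.mem)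
    (hbits : Bits (RunBlk Ar len) len w.mem (fOf u)) :
    DecodeInv others (framesIn frames u) len Ar stored room ysz w.mem (fOf u) := by
  have hinv := hst.inv
  have hoff := hinv.objOff
  have hfin := hinv.fb.vorbis.bits.OBR
  simp only [voff] at hoff hfin
  have hroom := hst.entry.room
  have htop := hst.entry.top
  simp only [Vorbis.conv_stackLo, Vorbis.conv_stackHi] at hroom htop
  have henv : Env (RunBlk Ar len) (Asan.Live (stackObjs (framesIn frames u) ++ others)) w.mem := hinv.fb.env.eqOn hun
  have hado : ADO Ar others w.mem (fOf u) := by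
    apply hinv.fb.ado.frame_stores hsame (by simp only [voff]; omega)
    · intro s hs
      have := seg3Wins_mem hs
      omega
    · intro s hs
      have := seg3Wins_mem hs
      omega
  have h7 : Mdct.M7Range w.mem (fOf u) := by
    apply hinv.fb.vorbis.buffers.M7.transfer
    apply ObjEq.of_sameExcept hsame
    · intro x hx
      simp only [Mdct.M7Range.wins, List.mem_cons, List.mem_nil_iff, or_false] at hx
      rcases hx with rfl | rfl <;> simp only [] <;> omega
    · intro x hx s hs
      have := seg3Wins_mem hs
      simp only [Mdct.M7Range.wins, List.mem_cons, List.mem_nil_iff, or_false] at hx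
      rcases hx with rfl | rfl <;> simp only [] <;> omega
  have hw1 : W1 w.mem (fOf u) := by
    apply hinv.fb.vorbis.w1.transfer
    apply ObjEq.of_sameExcept hsame
    · intro x hx
      simp only [W1.wins, List.mem_cons, List.mem_nil_iff, or_false] at hx
      rcases hx with rfl | rfl <;> simp only [] <;> omega
    · intro x hx s hs
      have := seg3Wins_mem hs
      simp only [W1.wins, List.mem_cons, List.mem_nil_iff, or_false] at hx
      rcases hx with rfl | rfl <;> simp only [] <;> omega
  exact hinv.frame_stores hsame (segWins_storeOK hst) henv hado (fun _ => hbits) (fun _ => h7) (fun _ => hw1)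

/-- **The configuration part of `*f` (`[f + 144, f + 1484)`: block sizes, the pointers, the mode records, `finalY[]`) reads the
same after the segment's stores.** -/
theorem config_eqOn (hst : Stable u₀ others frames len Ar stored room mode ysz u ret ls v)
    (hsame : Mem.SameExcept (seg3Wins u) v.mem w.mem) : Mem.EqOn (fOf u + 144) (fOf u + 1484) v.mem w.mem := by
  have hoff := hst.inv.objOff
  simp only [voff] at hoff
  have hroom := hst.entry.room
  have htop := hst.entry.top
  simp only [Vorbis.conv_stackLo, Vorbis.conv_stackHi] at hroom htop
  apply hsame.eqOn
  intro s hs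
  have := seg3Wins_mem hs
  omega

/-- **STABLE after the segment's stores** (the step every exit of the segment needs): the memory changed only inside `seg3Wins`,
no shadow byte was written, `Bits` holds in the new memory, the stack pointer is the steady one. -/
theorem stable_step (hst : Stable u₀ others frames len Ar stored room mode ysz u ret ls v)
    (hsame : Mem.SameExcept (seg3Wins u) v.mem w.mem) (hun : ShadowUntouched v.mem w.mem)
    (hbits : Bits (RunBlk Ar len) len w.mem (fOf u))
    (hrsp : w.reg .rsp = u.reg .rsp - 3000) (hcode : Vorbis.CodeOK u₀ w.mem) (habi : abiInv w) :
    Stable u₀ others frames len Ar stored room mode ysz u ret ls w := by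
  have hinv := hst.inv
  have hoff := hinv.objOff
  have hfin := hinv.fb.vorbis.bits.OBR
  simp only [voff] at hoff hfin
  have hroom := hst.entry.room
  have htop := hst.entry.top
  simp only [Vorbis.conv_stackLo, Vorbis.conv_stackHi] at hroom htop
  have hE := config_eqOn hst hsame
  obtain ⟨hsh, hinvu, hargs⟩ := hst.pre
  -- the mode record and the block sizes
  have hmd := hinvu.fb.vorbis.mode.MD1
  have hmlt := hargs.mode_lt
  have hm : mOf u = fOf u + 484 + 6 * mode := by
    rw [hargs.m_eq]
    simp only [vacc, voff]
  have e_bf : Mode.blockflag w.mem (mOf u) = Mode.blockflag v.mem (mOf u) := by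
    simp only [vacc, voff]
    apply hE.u8 <;> omega
  have e_b0 : stb_vorbis.blocksize_0 w.mem (fOf u) = stb_vorbis.blocksize_0 v.mem (fOf u) := by
    simp only [vacc, voff]
    apply hE.i32 <;> omega
  have e_b1 : stb_vorbis.blocksize_1 w.mem (fOf u) = stb_vorbis.blocksize_1 v.mem (fOf u) := by
    simp only [vacc, voff]
    apply hE.i32 <;> omega
  have e_n : nOf w.mem (fOf u) (mOf u) = nOf v.mem (fOf u) (mOf u) := by
    unfold nOf bsize
    rw [e_bf, e_b0, e_b1]
  -- where `p_left` points
  have hleft := hargs.left_obj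
  have hlw := hleft.1.where_ hsh.inv hsh.offText (by omega)
  have hl2 := hleft.2
  refine
    { entry := hst.entry
      pre := hst.pre
      rsp := hrsp
      code := hcode
      abi := habi
      same := ?_
      ra := ?_
      s_r15 := ?_
      s_r14 := ?_
      s_r13 := ?_
      s_r12 := ?_
      s_rbp := ?_
      s_rbx := ?_
      shadow := hst.shadow.untouched hun
      inv := seg3_inv_step hst hsame hun hbits
      slot_f := ?_
      slot_len := ?_
      slot_m := ?_
      slot_ls := ?_
      slot_rs := ?_
      slot_n := ?_
      slot_n2 := ?_
      slot_sb := ?_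
      arg_re := ?_
      arg_left := ?_
      left_val := ?_ }
  ·
    apply hst.same.step_same hsame
    intro s hs a h1 h2
    apply covered_footprint
    rcases seg3Wins_mem hs with h | h | h | h | h | h | h | h
    · exact Or.inl (by omega)
    · exact Or.inl (by omega)
    · exact Or.inl (by omega)
    · exact Or.inr (Or.inl ⟨⟨fOf u + 48, fOf u + 56⟩, by simp only [holes, List.mem_cons, true_or], by simp only []; omega, by simp only []; omega⟩)
    · exact Or.inr (Or.inl ⟨⟨fOf u + 80, fOf u + 112⟩, by simp only [holes, List.mem_cons, true_or, or_true], by simp only []; omega, by simp only []; omega⟩)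
    · exact Or.inr (Or.inl ⟨⟨fOf u + 132, fOf u + 144⟩, by simp only [holes, List.mem_cons, true_or, or_true], by simp only []; omega, by simp only []; omega⟩)
    · exact Or.inr (Or.inl ⟨⟨fOf u + 1480, fOf u + 1808⟩, by simp only [holes, List.mem_cons, List.mem_nil_iff, or_true, or_false], by simp only []; omega, by simp only []; omega⟩)
    · exact Or.inr (Or.inl ⟨⟨fOf u + 1480, fOf u + 1808⟩, by simp only [holes, List.mem_cons, List.mem_nil_iff, or_true, or_false], by simp only []; omega, by simp only []; omega⟩)
  ·
    rw [read_kept hst hsame _ 8 (by u_omega) (by u_omega)]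
    exact hst.ra
  ·
    rw [read_kept hst hsame _ 8 (by u_omega) (by u_omega)]
    exact hst.s_r15
  ·
    rw [read_kept hst hsame _ 8 (by u_omega) (by u_omega)]
    exact hst.s_r14
  ·
    rw [read_kept hst hsame _ 8 (by u_omega) (by u_omega)]
    exact hst.s_r13
  ·
    rw [read_kept hst hsame _ 8 (by u_omega) (by u_omega)]
    exact hst.s_r12
  ·
    rw [read_kept hst hsame _ 8 (by u_omega) (by u_omega)]
    exact hst.s_rbp
  ·
    rw [read_kept hst hsame _ 8 (by u_omega) (by u_omega)]
    exact hst.s_rbx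
  ·
    show w.mem.readLE (u.reg .rsp - 3000 + 0x40) 8 = _
    rw [read_kept hst hsame _ 8 (by u_omega) (by u_omega)]
    exact hst.slot_f
  ·
    show w.mem.readLE (u.reg .rsp - 3000 + 0x68) 8 = _
    rw [read_kept hst hsame _ 8 (by u_omega) (by u_omega)]
    exact hst.slot_len
  ·
    show w.mem.readLE (u.reg .rsp - 3000 + 0x70) 8 = _
    rw [read_kept hst hsame _ 8 (by u_omega) (by u_omega)]
    exact hst.slot_m
  ·
    show sint32 (w.mem.readLE (u.reg .rsp - 3000 + 0x78) 4) = _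
    rw [read_kept hst hsame _ 4 (by u_omega) (by u_omega)]
    exact hst.slot_ls
  ·
    show sint32 (w.mem.readLE (u.reg .rsp - 3000 + 0x7c) 4) = _
    rw [read_kept hst hsame _ 4 (by u_omega) (by u_omega)]
    exact hst.slot_rs
  ·
    show w.mem.readLE (u.reg .rsp - 3000 + 0x50) 4 = _
    rw [read_kept hst hsame _ 4 (by u_omega) (by u_omega), e_n]
    exact hst.slot_n
  ·
    show w.mem.readLE (u.reg .rsp - 3000 + 0x3c) 4 = _
    rw [read_kept hst hsame _ 4 (by u_omega) (by u_omega), e_n]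
    exact hst.slot_n2
  ·
    show w.mem.readLE (u.reg .rsp - 3000 + 0x60) 8 = _
    rw [read_kept hst hsame _ 8 (by u_omega) (by u_omega)]
    exact hst.slot_sb
  ·
    rw [read_kept hst hsame _ 4 (by u_omega) (by u_omega)]
    exact hst.arg_re
  ·
    rw [read_kept hst hsame _ 8 (by u_omega) (by u_omega)]
    exact hst.arg_left
  ·
    have ea : (addr (pLeftOf u)).toNat = pLeftOf u := toNat_addr _ (by omega)
    show sint32 (w.mem.readLE (addr (pLeftOf u)) 4) = _
    rw [read_kept hst hsame _ 4 (by rw [ea]; omega) (by rw [ea]; omega)]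
    exact hst.left_val

/-- The first fields of `*f` (`[f, f + 48)`: `channels` …) read the same after the segment's stores. -/
theorem low_eqOn (hst : Stable u₀ others frames len Ar stored room mode ysz u ret ls v)
    (hsame : Mem.SameExcept (seg3Wins u) v.mem w.mem) : Mem.EqOn (fOf u) (fOf u + 48) v.mem w.mem := by
  have hoff := hst.inv.objOff
  simp only [voff] at hoff
  have hroom := hst.entry.room
  have htop := hst.entry.top
  simp only [Vorbis.conv_stackLo, Vorbis.conv_stackHi] at hroom htop
  apply hsame.eqOn
  intro s hs
  have := seg3Wins_mem hs
  omega

/-- The block of the floor records reads the same after the segment's stores. -/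
theorem floor_kept (hst : Stable u₀ others frames len Ar stored room mode ysz u ret ls v)
    (hsame : Mem.SameExcept (seg3Wins u) v.mem w.mem) : (floorBlock v.mem (fOf u)).Kept v.mem w.mem :=
  StoreOK.reads_kept hst.inv.config hst.inv.ok hst.inv.sep hsame (segWins_storeOK hst) _ ConfigOK.Reads.floor

/-- A floor of `f` is still one after the segment's stores, and its record reads the same. -/
theorem floor_step (hst : Stable u₀ others frames len Ar stored room mode ysz u ret ls v)
    (hsame : Mem.SameExcept (seg3Wins u) v.mem w.mem) {g : Nat} (hg : IsFloor v.mem (fOf u) g) :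
    IsFloor w.mem (fOf u) g ∧ (Block.mk g Off.sizeof.Floor).Kept v.mem w.mem := by
  have hoff := hst.inv.objOff
  have hfin := hst.inv.fb.vorbis.bits.OBR
  simp only [voff] at hoff hfin
  have hroom := hst.entry.room
  have htop := hst.entry.top
  simp only [Vorbis.conv_stackLo, Vorbis.conv_stackHi] at hroom htop
  constructor
  · apply FloorShape.isFloor_frame _ hg
    apply FloorHdrEq.of_objEq
    apply ObjEq.of_sameExcept hsame
    · intro x hx
      simp only [FloorsOK.wins, List.mem_cons, List.mem_nil_iff, or_false] at hx
      subst hx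
      simp only []
      omega
    · intro x hx s hs
      have := seg3Wins_mem hs
      simp only [FloorsOK.wins, List.mem_cons, List.mem_nil_iff, or_false] at hx
      subst hx
      simp only []
      omega
  · exact hst.inv.fb.vorbis.floor.toFloorShape.elem_kept hg (floor_kept hst hsame)

/-- The three ghost values of the channel that the assertions restate with the current memory: `channels`, `finalY[i]`, `map`. -/
theorem chan_step (hst : Stable u₀ others frames len Ar stored room mode ysz u ret ls v)
    (hsame : Mem.SameExcept (seg3Wins u) v.mem w.mem) (i : Nat) (hi : (i : Int) < stb_vorbis.channels v.mem (fOf u)) :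
    stb_vorbis.channels w.mem (fOf u) = stb_vorbis.channels v.mem (fOf u) ∧
    stb_vorbis.finalY w.mem (fOf u) i = stb_vorbis.finalY v.mem (fOf u) i ∧
    mapOf w.mem (fOf u) (mOf u) = mapOf v.mem (fOf u) (mOf u) := by
  have hfin := hst.inv.fb.vorbis.bits.OBR
  simp only [voff] at hfin
  have hE := config_eqOn hst hsame
  have hL := low_eqOn hst hsame
  obtain ⟨hsh, hinvu, hargs⟩ := hst.pre
  have hmd := hinvu.fb.vorbis.mode.MD1
  have hmlt := hargs.mode_lt
  have hm : mOf u = fOf u + 484 + 6 * mode := by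
    rw [hargs.m_eq]
    simp only [vacc, voff]
  have hch := hst.inv.config.header.HD1
  refine ⟨?_, ?_, ?_⟩
  · simp only [vacc, voff]
    apply hL.i32 <;> omega
  · simp only [vacc, voff]
    apply hE.u64 <;> omega
  · unfold mapOf
    simp only [vacc, voff]
    have e1 : w.mem.u64 (fOf u + 472) = v.mem.u64 (fOf u + 472) := by
      apply hE.u64 <;> omega
    have e2 : w.mem.u8 (mOf u + 1) = v.mem.u8 (mOf u + 1) := by
      apply hE.u8 <;> omega
    rw [e1, e2]

/-- **The exit assertion `At5` (0x111000, `j ≥ partitions`) from `At3` at the segment's entry and the facts of the walk.** -/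
theorem at5_step {i j : Nat} (hat : At3 u₀ others frames len Ar stored room mode ysz u ret i j v)
    (hsame : Mem.SameExcept (seg3Wins u) v.mem w.mem) (hun : ShadowUntouched v.mem w.mem)
    (hbits : Bits (RunBlk Ar len) len w.mem (fOf u))
    (hrsp : w.reg .rsp = u.reg .rsp - 3000) (hcode : Vorbis.CodeOK u₀ w.mem) (habi : abiInv w)
    (hrip : w.rip = Vorbis.L.vorbis_decode_packet_rest.cut9) (hr15 : w.reg .r15 = v.reg .r15) :
    At5 u₀ others frames len Ar stored room mode ysz u ret i w := by
  have hst := hat.toStable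
  have hroom := hst.entry.room
  have htop := hst.entry.top
  simp only [Vorbis.conv_stackLo, Vorbis.conv_stackHi] at hroom htop
  obtain ⟨ec, ey, em⟩ := chan_step hst hsame i hat.i_lt
  refine
    { toStable := stable_step hst hsame hun hbits hrsp hcode habi
      rip := hrip
      g := ?_
      slot_i := ?_
      i_lt := ?_
      slot_finalY := ?_
      slot_map := ?_ }
  · rw [hr15]
    exact (floor_step hst hsame hat.g).1
  · show w.mem.readLE (u.reg .rsp - 3000 + 0x54) 4 = _
    rw [read_kept hst hsame _ 4 (by u_omega) (by u_omega)]
    exact hat.slot_i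
  · rw [ec]
    exact hat.i_lt
  · show w.mem.readLE (u.reg .rsp - 3000 + 0x20) 8 = _
    rw [read_kept hst hsame _ 8 (by u_omega) (by u_omega), ey]
    exact hat.slot_finalY
  · show w.mem.readLE (u.reg .rsp - 3000 + 0x58) 8 = _
    rw [read_kept hst hsame _ 8 (by u_omega) (by u_omega), em]
    exact hat.slot_map

/-- **The exit assertion `At4` (0x110d0a, `k = 0`) from `At3` at the segment's entry and the facts of the walk**: the four slots
of the head (`Head3Slots`, in terms of the floor read in the ENTRY memory), `[rsp + 0x18] = g`, `r14d = 0`. -/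
theorem at4_step {i j : Nat} (hat : At3 u₀ others frames len Ar stored room mode ysz u ret i j v)
    (hsame : Mem.SameExcept (seg3Wins u) v.mem w.mem) (hun : ShadowUntouched v.mem w.mem)
    (hbits : Bits (RunBlk Ar len) len w.mem (fOf u))
    (hrsp : w.reg .rsp = u.reg .rsp - 3000) (hcode : Vorbis.CodeOK u₀ w.mem) (habi : abiInv w)
    (hrip : w.rip = Vorbis.L.vorbis_decode_packet_rest.cut7) (hrbp : w.reg .rbp = v.reg .rbp) (hr14 : w.reg .r14 = 0)
    (hlt : j < Floor1.partitions v.mem (v.reg .r15).toNat)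
    (slots : Head3Slots u v w (v.reg .r15).toNat (Floor1.partition_class_list v.mem (v.reg .r15).toNat j))
    (s18 : w.mem.readLE (u.reg .rsp - 2976) 8 = (v.reg .r15).toNat) :
    At4 u₀ others frames len Ar stored room mode ysz u ret i j w := by
  have hst := hat.toStable
  have hroom := hst.entry.room
  have htop := hst.entry.top
  simp only [Vorbis.conv_stackLo, Vorbis.conv_stackHi] at hroom htop
  obtain ⟨ec, ey, em⟩ := chan_step hst hsame i hat.i_lt
  generalize hg : (v.reg .r15).toNat = g at *
  generalize hpc : Floor1.partition_class_list v.mem g j = pc at *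
  have hgF : IsFloor v.mem (fOf u) g := by
    rw [← hg]
    exact hat.g
  have hoffs := hat.slot_offset
  rw [hg] at hoffs
  obtain ⟨hgF', hk⟩ := floor_step hst hsame hgF
  have hg1 := hst.inv.fb.vorbis.floor.floor hgF
  have h4 := hg1.FL4
  have hpc256 : pc < 256 := by
    rw [← hpc]
    exact Floor1.partition_class_list_lt _ _ _
  have hcb3 : Floor1.class_subclasses v.mem g pc ≤ 3 := by
    have := (hg1.FL6 j hlt).sub
    rw [hpc] at this
    exact this
  obtain ⟨s38, s10, s2c, s30⟩ := slots
  have e18 : slot64 u w 0x18 = g := by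
    show w.mem.readLE (u.reg .rsp - 3000 + 0x18) 8 = g
    rw [show u.reg .rsp - 3000 + 0x18 = u.reg .rsp - 2976 by u_omega]
    exact s18
  have e38 : slot32 u w 0x38 = pc := by
    show w.mem.readLE (u.reg .rsp - 3000 + 0x38) 4 = pc
    rw [show u.reg .rsp - 3000 + 0x38 = u.reg .rsp - 2944 by u_omega]
    exact s38
  have e10 : slot32 u w 0x10 = Floor1.class_dimensions v.mem g pc := by
    show w.mem.readLE (u.reg .rsp - 3000 + 0x10) 4 = _
    rw [show u.reg .rsp - 3000 + 0x10 = u.reg .rsp - 2984 by u_omega]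
    exact s10
  have e2c : slot32 u w 0x2c = Floor1.class_subclasses v.mem g pc := by
    show w.mem.readLE (u.reg .rsp - 3000 + 0x2c) 4 = _
    rw [show u.reg .rsp - 3000 + 0x2c = u.reg .rsp - 2956 by u_omega]
    exact s2c
  have e30 : slot32 u w 0x30 = 2 ^ Floor1.class_subclasses v.mem g pc - 1 := by
    show w.mem.readLE (u.reg .rsp - 3000 + 0x30) 4 = _
    rw [show u.reg .rsp - 3000 + 0x30 = u.reg .rsp - 2952 by u_omega, s30, Nat.mod_eq_of_lt (by omega)]
    exact mask_toNat _ (by omega)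
  refine
    { toStable := stable_step hst hsame hun hbits hrsp hcode habi
      rip := hrip
      rbp := ?_
      r14 := hr14
      g := ?_
      slot_j := ?_
      j_lt := ?_
      slot_pclass := ?_
      slot_cdim := ?_
      slot_cbits := ?_
      slot_csub := ?_
      slot_offset := ?_
      slot_i := ?_
      i_lt := ?_
      slot_finalY := ?_
      slot_map := ?_ }
  · rw [hrbp]
    exact hat.rbp
  · rw [e18]
    exact hgF'
  · show w.mem.readLE (u.reg .rsp - 3000 + 0x48) 4 = _
    rw [read_kept hst hsame _ 4 (by u_omega) (by u_omega)]
    exact hat.slot_j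
  · rw [e18, Floor1.same_partitions hk.same hk.inside]
    exact hlt
  · rw [e38, e18, Floor1.same_partition_class_list hk.same hk.inside j (by omega)]
    exact hpc.symm
  · rw [e10, e18, e38, Floor1.same_class_dimensions hk.same hk.inside pc hpc256]
  · rw [e2c, e18, e38, Floor1.same_class_subclasses hk.same hk.inside pc hpc256]
  · rw [e30, e2c]
  · show w.mem.readLE (u.reg .rsp - 3000 + 0x8) 4 = _
    rw [read_kept hst hsame _ 4 (by u_omega) (by u_omega), e18, Floor1.same_dimSum hk.same hk.inside j (by omega)]
    exact hoffs
  · show w.mem.readLE (u.reg .rsp - 3000 + 0x54) 4 = _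
    rw [read_kept hst hsame _ 4 (by u_omega) (by u_omega)]
    exact hat.slot_i
  · rw [ec]
    exact hat.i_lt
  · show w.mem.readLE (u.reg .rsp - 3000 + 0x20) 8 = _
    rw [read_kept hst hsame _ 8 (by u_omega) (by u_omega), ey]
    exact hat.slot_finalY
  · show w.mem.readLE (u.reg .rsp - 3000 + 0x58) 8 = _
    rw [read_kept hst hsame _ 8 (by u_omega) (by u_omega), em]
    exact hat.slot_map

end Pure
/-- `shl rbx, 2` is a multiplication by 4. -/
theorem shl2 (x : Word) : x <<< 2 = x * 4 := by
  bv_decide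

/-- The segment's footprint after more stores into the callee area and the slot `[rsp + 0x18]` of the own frame. -/
theorem seg_stack_same {u : State} {m0 m1 m2 : Mem} (h : Mem.SameExcept (seg3Wins u) m0 m1)
    (hs : Mem.SameExcept [⟨(u.reg .rsp).toNat - 3856, (u.reg .rsp).toNat - 2996⟩,
      ⟨(u.reg .rsp).toNat - 2976, (u.reg .rsp).toNat - 2968⟩] m1 m2) : Mem.SameExcept (seg3Wins u) m0 m2 := by
  apply h.step_same hs
  intro w hw a k1 k2
  simp only [List.mem_cons, List.mem_nil_iff, or_false] at hw
  rcases hw with rfl | rfl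
  · have k1' : (u.reg .rsp).toNat - 3856 ≤ a := k1
    have k2' : a < (u.reg .rsp).toNat - 2996 := k2
    refine ⟨⟨(u.reg .rsp).toNat - 3856, (u.reg .rsp).toNat - 2992⟩, ?_, k1', ?_⟩
    · simp only [seg3Wins, List.mem_cons, true_or]
    · exact Nat.lt_of_lt_of_le k2' (Nat.sub_le_sub_left (by decide) _)
  · have k1' : (u.reg .rsp).toNat - 2976 ≤ a := k1
    have k2' : a < (u.reg .rsp).toNat - 2968 := k2
    refine ⟨⟨(u.reg .rsp).toNat - 2984, (u.reg .rsp).toNat - 2968⟩, ?_, ?_, k2'⟩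
    · simp only [seg3Wins, List.mem_cons, true_or, or_true]
    · exact Nat.le_trans (Nat.sub_le_sub_left (by decide) _) k1'

/-- `Bits` over stores into the own frame. -/
theorem bits_stack {Blk : Block → Prop} {len f : Nat} {u : State} {m1 m2 : Mem} (hb : Bits Blk len m1 f)
    (hs : Mem.SameExcept [⟨(u.reg .rsp).toNat - 3856, (u.reg .rsp).toNat - 2996⟩,
      ⟨(u.reg .rsp).toNat - 2976, (u.reg .rsp).toNat - 2968⟩] m1 m2)
    (hroom : 0x700000 + 3856 ≤ (u.reg .rsp).toNat) (htop : (u.reg .rsp).toNat + 8 ≤ 0x800000)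
    (hoff : f + 1808 ≤ 0x700000 ∨ 0x800000 ≤ f) : Bits Blk len m2 f := by
  have hfin := hb.OBR
  simp only [voff] at hfin
  apply hb.frame
  apply ObjSame.of_sameExcept hs (by simp only [voff]; omega)
  intro s hs'
  simp only [List.mem_cons, List.mem_nil_iff, or_false] at hs'
  rcases hs' with rfl | rfl <;> simp only [] <;> omega

/-- **The translation step of DECODE and `k = 0`** (0x110fc2 … 0x110ffb, 0x110e60 … 0x110e6f): `if (c->sparse) var =
c->sorted_values[var]` (the load with `var = −1` reads the sentinel word before the pointer: K4), then `r14d = 0`,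
`[rsp + 0x18] = g`, `[rsp] = cval` → the exit assertion `At4`. -/
theorem tail_reach (Lay : Layout) (hLay : Lay.hi = 0x1000000) (μ : Microarch) (hμ : UserX.MicroOK μ) (u₀ : State)
    (hcode : HasCodeNat Lay u₀ Vorbis.L.vorbis_decode_packet_rest.entry Vorbis.Code.code_vorbis_decode_packet_rest.nat
      Vorbis.L.vorbis_decode_packet_rest.size)
    (hl1 : Asan.SmallCheck Lay μ Vorbis.WayInv (Vorbis.CodeOK u₀) [.rax, .rdx] 1 Vorbis.L.__asan_load1_noabort.entry)
    (hl8 : Asan.SmallCheck Lay μ Vorbis.WayInv (Vorbis.CodeOK u₀) [.rax, .rcx, .rdx] 8 Vorbis.L.__asan_load8_noabort.entry)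
    (hl4 : Asan.SmallCheck Lay μ Vorbis.WayInv (Vorbis.CodeOK u₀) [.rax, .rcx, .rdx] 4 Vorbis.L.__asan_load4_noabort.entry)
    (others : List Obj) (frames : List (Nat × FrameLayout)) (len : Nat) (Ar : Arena) (stored room : Int)
    (mode : Nat) (ysz : Nat → Nat) (u : State) (ret : Word) (i j : Nat) (v : State)
    (hat : At3 u₀ others frames len Ar stored room mode ysz u ret i j v) (mb : Nat) (m : State)
    (hlt : j < Floor1.partitions v.mem (v.reg .r15).toNat)
    (hmb : (mb : Int) < stb_vorbis.codebook_count v.mem (fOf u))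
    (hmid : At3Mid u₀ u v (RunBlk Ar len) len (v.reg .r15).toNat
      (Floor1.partition_class_list v.mem (v.reg .r15).toNat j) (stb_vorbis.codebooks_at v.mem (fOf u) mb) Vorbis.L.vorbis_decode_packet_rest.at_110fc2 m)
    (hres : DecodeRawResult v.mem (stb_vorbis.codebooks_at v.mem (fOf u) mb) (s32 (m.reg .r12))) :
    ReachVia Lay μ Vorbis.WayInv m (fun w => At5 u₀ others frames len Ar stored room mode ysz u ret i w ∨
      At4 u₀ others frames len Ar stored room mode ysz u ret i j w) := by
  have he := hat.entry
  v_entry he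
  clear he_eq
  have hst := hat.toStable
  have hinv := hst.inv
  have hshadow := hst.shadow
  have hlive := hinv.live
  obtain ⟨w_rip, hm_rsp, hmrbp, hmr15, hm_r13, w_eq, habi, hsm, hunm, hbm, slots⟩ := hmid
  have hdf : m.flags .df = false := (show abiInv _ from habi).1
  have hmx : m.mxcsr &&& 0x1F80 = 0x1F80 := (show abiInv _ from habi).2
  have hsse := Vorbis.sseOK_of_abiInv habi
  generalize hc : stb_vorbis.codebooks_at v.mem (fOf u) mb = c at *
  have hm_rbp : m.reg .rbp = addr (fOf u) := by
    rw [hmrbp]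
    exact eq_addr _ _ hat.rbp
  have hm_r15 : m.reg .r15 = addr (v.reg .r15).toNat := by
    rw [hmr15]
    exact (addr_toNat _).symm
  -- the codebook
  have hcbA := hinv.fb.vorbis.codebooks
  have hcbok : CodebookOK (RunBlk Ar len) v.mem c := by
    rw [← hc]
    exact hcbA.ok mb (by omega)
  obtain ⟨B, hB, hin⟩ := CodebooksUpTo.book_in (groups_laws len) hcbA hmb
  rw [hc] at hin
  have hap : BookApart v.mem (fOf u) c := by
    rw [← hc]
    exact hinv.books mb hmb
  have hBoff := hinv.offStack B hB
  have hBin := hinv.ok.inside B hB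
  have hfin := hbm.OBR
  have hfoff := hinv.objOff
  have hapb := hap.book
  simp only [vblock, voff] at hin hfin hfoff hapb hBin
  -- the fields of `*c` the code loads, in the current memory
  have rd : ∀ (off n : Nat), off + n ≤ 2120 → m.mem.readLE (addr (c + off)) n = v.mem.readLE (addr (c + off)) n := by
    intro off n ho
    have ea : (addr (c + off)).toNat = c + off := toNat_addr _ (by omega)
    apply hsm.readLE _ n (by rw [ea]; omega)
    intro s hs
    have := seg3Wins_mem hs
    rw [ea]
    omega
  have eC1 : addr c + 27 = addr (c + 27) := addr_add_lit c 27
  have eC2 : addr c + 2104 = addr (c + 2104) := addr_add_lit c 2104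
  have hTc1 : (addr (c + 27)).toNat = c + 27 := toNat_addr _ (by omega)
  have hTc2 : (addr (c + 2104)).toNat = c + 2104 := toNat_addr _ (by omega)
  have L1 : m.mem.readLE (addr (c + 27)) 1 = Codebook.sparse v.mem c := rd 27 1 (by omega)
  have L2 : m.mem.readLE (addr (c + 2104)) 8 = Codebook.sorted_values v.mem c := rd 2104 8 (by omega)
  have hok := hinv.ok
  have hcov := hinv.fb.env.covers
  have hsC1 := Codebook.site_field hlive hB (by simp only [vblock]; exact hin) 27 1 (by simp only [voff]; omega) (by omega)
    (a := c + 27) rfl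
  have hsC2 := Codebook.site_field hlive hB (by simp only [vblock]; exact hin) 2104 8 (by simp only [voff]; omega) (by omega)
    (a := c + 2104) rfl
  by_cases hsp : Codebook.sparse v.mem c = 0
  · -- a dense book: no translation
    u_walk hcode [hμ.vendor, eC1, eC2] until [Vorbis.L.vorbis_decode_packet_rest.cut7] span [Vorbis.L.textLo, Vorbis.L.textHi] side (v_side)
    case check_110fc6 =>
      have hun : ShadowUntouched m.mem s_110fc6.mem := by v_untouched
      exact check_site hshadow (Mem.EqOn.trans hunm hun) hsC1 hTc1
    -- 0x110e6f → 0x110d0a: the exit assertion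
    have h2 : Mem.SameExcept [⟨(u.reg .rsp).toNat - 3856, (u.reg .rsp).toNat - 2996⟩,
        ⟨(u.reg .rsp).toNat - 2976, (u.reg .rsp).toNat - 2968⟩] m.mem s_110e6f.mem := by
      u_same
    have hun2 : ShadowUntouched m.mem s_110e6f.mem := by v_untouched
    refine ReachVia.done (Or.inr ?_)
    refine at4_step hat (seg_stack_same hsm h2) (Mem.EqOn.trans hunm hun2) (bits_stack hbm h2 he_room he_top hfoff)
      w_rsp w_eq ?_ w_rip ?_ ?_ hlt ⟨?_, ?_, ?_, ?_⟩ ?_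
    · v_inv
    · rw [w_kept .rbp rfl]
      exact hmrbp
    · rw [w_r14]
      rfl
    · u_frame slots.s38
    · u_frame slots.s10
    · u_frame slots.s2c
    · u_frame slots.s30
    · have h : s_110e6f.mem.readLE (u.reg .rsp - 2976) 8 = (v.reg .r15).toNat := by
        u_resolve
      exact h
  · -- a sparse book: `var = sorted_values[var]`
    have hse := hcbok.se_pos_of_sparse hsp
    have hge := hcbok.sorted_values_ge hok hse
    have hNs := Codebook.N_sparse (mem := v.mem) (c := c) hsp
    have hvar : -1 ≤ s32 (m.reg .r12) ∧ s32 (m.reg .r12) < Codebook.sorted_entries v.mem c := by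
      rw [← hNs]
      rcases hres with h | h
      · rw [h]
        have := hcbok.N_nonneg
        omega
      · omega
    have hsvblk := hinv.offStack _ (hcbok.K4.sv hse)
    simp only [] at hsvblk
    generalize hSV : Codebook.sorted_values v.mem c = SV at *
    generalize hvv : s32 (m.reg .r12) = var at *
    obtain ⟨a, ha⟩ : ∃ a : Nat, a = SV - 4 + 4 * (var + 1).toNat := ⟨_, rfl⟩
    have hsS : Site (LiveSet others (framesIn frames u)) a 4 := by
      rw [← hSV] at ha
      exact hcbok.site_sortedValue hlive hsp hres ha
    have hain := hsS.inside hcov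
    have hTa : (addr a).toNat = a := toNat_addr _ (by omega)
    have haoff : a + 4 ≤ 0x700000 ∨ 0x800000 ≤ a := by
      omega
    have eS : Word.ofBV (BitVec.signExtend 64 (Word.part .w32 (m.reg .r12))) <<< 2 + UInt64.ofNat SV = addr a := by
      rw [shl2, ofBV_signExtend64, ha, ← addr_add_word_mul4 SV var hvar.1 (by omega), ← hvv, UInt64.add_comm]
      rfl
    obtain ⟨X, hX⟩ : ∃ X : Nat, m.mem.readLE (addr a) 4 = X := ⟨_, rfl⟩
    u_walk hcode [hμ.vendor, eC1, eC2, eS] until [Vorbis.L.vorbis_decode_packet_rest.cut7] span [Vorbis.L.textLo, Vorbis.L.textHi] side (v_side)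
    case check_110fc6 =>
      have hun : ShadowUntouched m.mem s_110fc6.mem := by v_untouched
      exact check_site hshadow (Mem.EqOn.trans hunm hun) hsC1 hTc1
    case check_110fdd =>
      have hun : ShadowUntouched m.mem s_110fdd.mem := by v_untouched
      exact check_site hshadow (Mem.EqOn.trans hunm hun) hsC2 hTc2
    case check_110ff3 =>
      have hun : ShadowUntouched m.mem s_110ff3.mem := by v_untouched
      exact check_site hshadow (Mem.EqOn.trans hunm hun) hsS hTa
    · -- the `je` arm: infeasible for a sparse book
      exfalso
      have h256 : Codebook.sparse v.mem c < 256 := by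
        simp only [vacc]
        exact v.mem.u8_lt _
      omega
    · -- 0x110e6f → 0x110d0a: the exit assertion
      have h2 : Mem.SameExcept [⟨(u.reg .rsp).toNat - 3856, (u.reg .rsp).toNat - 2996⟩,
          ⟨(u.reg .rsp).toNat - 2976, (u.reg .rsp).toNat - 2968⟩] m.mem s_110e6f.mem := by
        u_same
      have hun2 : ShadowUntouched m.mem s_110e6f.mem := by v_untouched
      refine ReachVia.done (Or.inr ?_)
      refine at4_step hat (seg_stack_same hsm h2) (Mem.EqOn.trans hunm hun2) (bits_stack hbm h2 he_room he_top hfoff)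
        w_rsp w_eq ?_ w_rip ?_ ?_ hlt ⟨?_, ?_, ?_, ?_⟩ ?_
      · v_inv
      · rw [w_kept .rbp rfl]
        exact hmrbp
      · rw [w_r14]
        rfl
      · u_frame slots.s38
      · u_frame slots.s10
      · u_frame slots.s2c
      · u_frame slots.s30
      · have h : s_110e6f.mem.readLE (u.reg .rsp - 2976) 8 = (v.reg .r15).toNat := by
          u_resolve
        exact h


end Vorbis.Spec.vorbis_decode_packet_rest_3c
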